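-- pv_equiv track=rewrite | github.com/mthomas46/Hackathon | services/analysis-service/main.py | analyze_python_file
-- ===== SOURCE A (Python) =====
-- def analyze_python_file(lines: list) -> dict:
--     """Analyze Python file for common issues."""
--     issues = {"complex_functions": [], "long_methods": []}
--
--     current_function = None
--     function_lines = 0
--
--     for i, line in enumerate(lines):
--         # Track function definitions
--         if line.strip().startswith("def "):
--             if current_function and function_lines > 50:
--                 issues["long_methods"].append(f"{current_function} ({function_lines} lines)")
--
--             current_function = line.split("def ")[1].split("(")[0]
--             function_lines = 0
--         elif current_function:
--             function_lines += 1
--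
--             # Check for complexity indicators
--             if any(keyword in line.lower() for keyword in ["if", "elif", "for", "while"]) and line.count("and") + line.count("or") > 2:
--                 issues["complex_functions"].append(f"{current_function} (line {i+1})")
--
--     # Check last function
--     if current_function and function_lines > 50:
--         issues["long_methods"].append(f"{current_function} ({function_lines} lines)")
--
--     return issues
-- ===== SOURCE B (Python) =====
-- def analyze_python_file(lines: list) -> dict:
--     """Analyze Python file for common issues (single backward pass)."""
--     cf_rev = []   # complex_functions entries, collected in reverse order
--     lm_rev = []   # long_methods entries, collected in reverse order
--     pending = []  # line numbers of complexity hits below, awaiting their def line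
--     count = 0     # body lines seen below, up to the nearest def line
--     for i in range(len(lines) - 1, -1, -1):
--         line = lines[i]
--         if line.strip().startswith("def "):
--             name = line.split("def ")[1].split("(")[0]
--             if name:
--                 if count > 50:
--                     lm_rev.append(f"{name} ({count} lines)")
--                 for j in pending:
--                     cf_rev.append(f"{name} (line {j})")
--             pending = []
--             count = 0
--         else:
--             count += 1
--             if any(keyword in line.lower() for keyword in ["if", "elif", "for", "while"]) and line.count("and") + line.count("or") > 2:
--                 pending.append(i + 1)
--     cf_rev.reverse()
--     lm_rev.reverse()
--     return {"complex_functions": cf_rev, "long_methods": lm_rev}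
-- ===== Notes on version B (the rewrite author's own statement) =====
-- stated objective: alternative
-- what changed: A scans forward keeping a current-function name and line counter and emits reports as it goes; B makes a single backward pass that defers complexity hits and a body count until the def line above them is reached, then reverses the collected reports.
import Mathlib
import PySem

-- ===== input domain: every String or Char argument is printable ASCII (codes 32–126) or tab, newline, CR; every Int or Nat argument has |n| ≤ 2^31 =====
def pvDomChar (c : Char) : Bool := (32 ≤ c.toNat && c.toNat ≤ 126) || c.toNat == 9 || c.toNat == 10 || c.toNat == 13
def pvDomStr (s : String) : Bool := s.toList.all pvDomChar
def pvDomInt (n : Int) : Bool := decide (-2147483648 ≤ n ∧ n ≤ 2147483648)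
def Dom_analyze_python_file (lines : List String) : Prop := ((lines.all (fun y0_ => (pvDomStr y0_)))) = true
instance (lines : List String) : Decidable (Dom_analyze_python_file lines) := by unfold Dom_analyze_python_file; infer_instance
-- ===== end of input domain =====

-- B replaces A's forward scan (current-function state, inline emission) by a single backward
-- pass that defers each segment's complexity hits and body count until its def line is reached,
-- then reverses the collected reports; same cost, different traversal (objective: alternative).
-- The Python dict result (two fixed keys) is modeled as the 2-entry association list.

-- ===== shared primitive helpers (each is the same Python expression in both programs) =====
-- line.strip().startswith("def ")
def pvIsDef (l : String) : Bool := PySem.Str.startswith (PySem.Str.strip l) "def "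
-- line.split("def ")[1].split("(")[0]   (the [1] exists whenever pvIsDef l; getD is unreachable there)
def pvNameOf (l : String) : String :=
  (((PySem.Str.split? ((PySem.List.pyGet? ((PySem.Str.split? l "def ").getD []) 1).getD "") "(").getD []).headD "")
-- any(kw in line.lower() for kw in [...]) and line.count("and") + line.count("or") > 2
def pvIsComplex (l : String) : Bool :=
  (["if", "elif", "for", "while"].any (fun kw => PySem.Str.isIn kw (PySem.Str.lower l))) &&
  decide (PySem.Str.count l "and" + PySem.Str.count l "or" > 2)
-- Python truthiness of current_function (None or "" are falsy)
def pvTruthy : Option String → Bool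
  | none => false
  | some s => s ≠ ""
-- f"{name} ({fl} lines)"
def pvFmtLong (n : String) (fl : Int) : String := n ++ " (" ++ PySem.Int.toStr fl ++ " lines)"
-- f"{name} (line {j})"
def pvFmtCx (n : String) (j : Int) : String := n ++ " (line " ++ PySem.Int.toStr j ++ ")"

-- ===== PORT A =====
-- A's for-loop over enumerate(lines) as structural recursion over the same state
-- (i, current_function, function_lines, issues["complex_functions"], issues["long_methods"]);
-- the final long-method check is the [] case.
def pvLoopA : List String → Int → Option String → Int → List String → List String →
    List String × List String
  | [], _i, cur, fl, cf, lm =>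
      if pvTruthy cur && decide (fl > 50) then (cf, lm ++ [pvFmtLong (cur.getD "") fl]) else (cf, lm)
  | l :: ls, i, cur, fl, cf, lm =>
      if pvIsDef l then
        pvLoopA ls (i + 1) (some (pvNameOf l)) 0 cf
          (if pvTruthy cur && decide (fl > 50) then lm ++ [pvFmtLong (cur.getD "") fl] else lm)
      else if pvTruthy cur then
        pvLoopA ls (i + 1) cur (fl + 1)
          (if pvIsComplex l then cf ++ [pvFmtCx (cur.getD "") (i + 1)] else cf) lm
      else
        pvLoopA ls (i + 1) cur fl cf lm

def analyze_python_file (lines : List String) : List (String × List String) :=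
  let r := pvLoopA lines 0 none 0 [] []
  [("complex_functions", r.1), ("long_methods", r.2)]

-- ===== PORT B =====
-- Source B's backward for-loop (range(len-1, -1, -1)) as recursion that handles the head line
-- AFTER the tail: state is (count, pending, cf_rev, lm_rev) exactly as in Source B.
def pvLoopB : List String → Int → Int × List Int × List String × List String
  | [], _i => (0, [], [], [])
  | l :: ls, i =>
      let r := pvLoopB ls (i + 1)
      if pvIsDef l then
        let n := pvNameOf l
        if n ≠ "" then
          (0, [],
           r.2.2.1 ++ r.2.1.map (fun j => pvFmtCx n j),
           if r.1 > 50 then r.2.2.2 ++ [pvFmtLong n r.1] else r.2.2.2)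
        else (0, [], r.2.2.1, r.2.2.2)
      else
        (r.1 + 1, (if pvIsComplex l then r.2.1 ++ [i + 1] else r.2.1), r.2.2.1, r.2.2.2)

def analyze_python_file_alt (lines : List String) : List (String × List String) :=
  let r := pvLoopB lines 0
  [("complex_functions", r.2.2.1.reverse), ("long_methods", r.2.2.2.reverse)]

-- ===== PRECONDITION & SPEC =====
def Spec_analyze_python_file (lines : List String) (out : List (String × List String)) : Prop := out = analyze_python_file_alt lines
instance (lines : List String) (out : List (String × List String)) : Decidable (Spec_analyze_python_file lines out) := by unfold Spec_analyze_python_file; infer_instance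

-- ===== CLAIM (what is proved, stated in full; the proofs are below) =====
def Claim_equal_analyze_python_file : Prop := ∀ (lines : List String), Dom_analyze_python_file lines → Spec_analyze_python_file lines (analyze_python_file lines)

-- ===== LEMMAS AND PROOFS =====

-- The invariant: A's forward loop from any state equals B's backward result on the suffix,
-- with the still-open segment (pending hits, body count) resolved by A's current function.
theorem pvMain (ls : List String) : ∀ (i fl : Int) (cur : Option String) (cf lm : List String),
    pvLoopA ls i cur fl cf lm =
      ( cf ++ (if pvTruthy cur then ((pvLoopB ls i).2.1.map (fun j => pvFmtCx (cur.getD "") j)).reverse else [])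
           ++ (pvLoopB ls i).2.2.1.reverse,
        lm ++ (if pvTruthy cur then
                 (if fl + (pvLoopB ls i).1 > 50 then [pvFmtLong (cur.getD "") (fl + (pvLoopB ls i).1)] else [])
               else [])
           ++ (pvLoopB ls i).2.2.2.reverse ) := by
  induction ls with
  | nil =>
    intro i fl cur cf lm
    simp only [pvLoopA, pvLoopB]
    cases cur with
    | none => simp [pvTruthy]
    | some n =>
      by_cases hn : n = ""
      · simp [pvTruthy, hn]
      · by_cases hfl : fl > 50 <;> simp [pvTruthy, hn, hfl]
  | cons l ls ih =>
    intro i fl cur cf lm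
    by_cases hd : pvIsDef l
    · -- def line: A closes the current segment and opens pvNameOf l; B resolves its pending
      simp only [pvLoopA, pvLoopB, hd, if_pos, ih]
      by_cases hn : pvNameOf l = ""
      · -- new name is falsy: B discards pending; A's new cur is falsy too
        cases cur with
        | none => simp [pvTruthy, hn]
        | some n =>
          by_cases hn' : n = "" <;> by_cases hfl : fl > 50 <;> simp [pvTruthy, hn, hn', hfl]
      · by_cases hc : (pvLoopB ls (i + 1)).1 > 50 <;>
          cases cur with
          | none => simp [pvTruthy, hn, hc, List.append_assoc]
          | some n =>
            by_cases hn' : n = "" <;> by_cases hfl : fl > 50 <;>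
              simp [pvTruthy, hn, hn', hc, hfl, List.append_assoc]
    · -- non-def line
      simp only [pvLoopA, pvLoopB, hd, ih]
      cases cur with
      | none => simp [pvTruthy]
      | some n =>
        by_cases hn : n = ""
        · simp [pvTruthy, hn]
        · have harith : fl + 1 + (pvLoopB ls (i + 1)).1 = fl + ((pvLoopB ls (i + 1)).1 + 1) := by ring
          by_cases hcx : pvIsComplex l <;>
            simp [pvTruthy, hn, hcx, harith, List.append_assoc]

-- ===== VERDICT (by name: the statement is the Claim_ definition above) =====
theorem analyze_python_file_spec : Claim_equal_analyze_python_file := by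
  intro lines _hdom
  unfold Spec_analyze_python_file analyze_python_file analyze_python_file_alt
  simp [pvMain lines 0 0 none [] [], pvTruthy]
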